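-- pv_equiv track=rewrite | github.com/eroshapdl/practice_tasks | main/character_indices.py | find_character_indices
-- ===== SOURCE A (Python) =====
-- def find_character_indices(text):
--     char_indices = {}
--     for i, char in enumerate(text):
--         if char in char_indices:
--             char_indices[char].append(i)
--         else:
--             char_indices[char] = [i]
--     return char_indices
-- ===== SOURCE B (Python) =====
-- def find_character_indices(text):
--     return {c: [i for i, ch in enumerate(text) if ch == c]
--             for c in dict.fromkeys(text)}
-- ===== Notes on version B (the rewrite author's own statement) =====
-- stated objective: alternative
-- what changed: Replaces the single pass that maintains a dict of growing index lists with a dict comprehension: distinct characters in first-occurrence order via dict.fromkeys, then one full rescan of enumerate(text) per distinct character.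
import Mathlib
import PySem

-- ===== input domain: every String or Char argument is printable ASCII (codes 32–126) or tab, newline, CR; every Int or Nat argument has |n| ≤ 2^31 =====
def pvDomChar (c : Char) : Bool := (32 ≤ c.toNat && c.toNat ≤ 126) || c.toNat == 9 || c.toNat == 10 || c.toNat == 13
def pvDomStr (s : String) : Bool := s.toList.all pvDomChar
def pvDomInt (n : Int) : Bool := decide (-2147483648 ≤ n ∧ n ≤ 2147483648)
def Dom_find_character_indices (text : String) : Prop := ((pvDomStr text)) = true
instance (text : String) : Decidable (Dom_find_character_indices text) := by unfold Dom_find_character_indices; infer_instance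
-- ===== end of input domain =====

-- B replaces A's single accumulating pass by a dict comprehension (one rescan per distinct character); same result.

-- ===== PORT A =====
-- one pass over enumerate(text), maintaining a dict of index lists
-- ('char_indices[char].append(i)' on an existing key sets d[char] to d.get(char, []) ++ [i], i.e. Dict.modify)
def find_character_indices (text : String) : List (String × List Int) :=
  ((PySem.List.enumerate text.toList 0).foldl
    (fun (d : PySem.Dict String (List Int)) (p : Int × Char) =>
      if d.contains (String.ofList [p.2]) then
        d.modify (String.ofList [p.2]) [] (fun v => v ++ [p.1])
      else
        d.insert (String.ofList [p.2]) [p.1])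
    PySem.Dict.empty).items

-- ===== PORT B =====
-- {c: [i for i, ch in enumerate(text) if ch == c] for c in dict.fromkeys(text)}
def find_character_indices_alt (text : String) : List (String × List Int) :=
  (PySem.List.dedup text.toList).map
    (fun c => (String.ofList [c],
      ((PySem.List.enumerate text.toList 0).filter (fun p => p.2 == c)).map (fun p => p.1)))

-- ===== PRECONDITION & SPEC =====
def Spec_find_character_indices (text : String) (out : List (String × List Int)) : Prop := out = find_character_indices_alt text
instance (text : String) (out : List (String × List Int)) : Decidable (Spec_find_character_indices text out) := by unfold Spec_find_character_indices; infer_instance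

-- ===== CLAIM (what is proved, stated in full; the proofs are below) =====
def Claim_equal_find_character_indices : Prop := ∀ (text : String), Dom_find_character_indices text → Spec_find_character_indices text (find_character_indices text)

-- ===== LEMMAS AND PROOFS =====

theorem mkStr_inj {a b : Char} (h : String.ofList [a] = String.ofList [b]) : a = b := by
  have := congrArg String.toList h
  simp only [String.toList_ofList, List.cons.injEq, and_true] at this
  exact this

theorem mkStr_beq (a b : Char) : (String.ofList [a] == String.ofList [b]) = (a == b) := by
  by_cases h : a = b
  · simp [h]
  · have h2 : String.ofList [a] ≠ String.ofList [b] := fun hs => h (mkStr_inj hs)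
    simp [h, h2]

-- Set.ofList commutes with the injective map c ↦ String.ofList [c] (keys of A's dict vs. dedup of B)
theorem ofList_map_inj (f : Char → String) (hf : ∀ a b, f a = f b → a = b) (xs : List Char) :
    PySem.Set.ofList (xs.map f) = (PySem.Set.ofList xs).map f := by
  induction xs using List.reverseRecOn with
  | nil => rfl
  | append_singleton xs x ih =>
      rw [List.map_append, List.map_singleton, PySem.Set.ofList_append_singleton,
        PySem.Set.ofList_append_singleton, ih]
      by_cases h : x ∈ PySem.Set.ofList xs
      · have hm : f x ∈ (PySem.Set.ofList xs).map f := List.mem_map_of_mem h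
        simp [PySem.Set.add, PySem.Set.contains, h, hm]
      · have hm : f x ∉ (PySem.Set.ofList xs).map f := by
          intro hm
          obtain ⟨a, ha, hfa⟩ := List.mem_map.mp hm
          exact h (hf a x hfa ▸ ha)
        simp [PySem.Set.add, PySem.Set.contains, h, hm]

-- A's step is Dict.modify in both branches (the else-branch inserts [] ++ [i])
theorem stepA_eq_modify (d : PySem.Dict String (List Int)) (p : Int × Char) :
    (if d.contains (String.ofList [p.2]) then
        d.modify (String.ofList [p.2]) [] (fun v => v ++ [p.1])
      else
        d.insert (String.ofList [p.2]) [p.1])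
    = d.modify (String.ofList [p.2]) [] (fun v => v ++ [p.1]) := by
  by_cases h : d.contains (String.ofList [p.2]) = true
  · simp [h]
  · have h' : d.contains (String.ofList [p.2]) = false := by simpa using h
    simp [h', PySem.Dict.modify, PySem.Dict.getD_of_not_contains _ _ h']

theorem find_character_indices_eq_alt (text : String) :
    find_character_indices text = find_character_indices_alt text := by
  unfold find_character_indices find_character_indices_alt
  set s := text.toList with hs
  set l := PySem.List.enumerate s 0 with hl
  have hfold : l.foldl
      (fun (d : PySem.Dict String (List Int)) (p : Int × Char) =>
        if d.contains (String.ofList [p.2]) then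
          d.modify (String.ofList [p.2]) [] (fun v => v ++ [p.1])
        else
          d.insert (String.ofList [p.2]) [p.1])
      PySem.Dict.empty
      = (l.map (fun p : Int × Char => (String.ofList [p.2], p.1))).foldl
          (fun (d : PySem.Dict String (List Int)) (q : String × Int) =>
            d.modify q.1 [] (fun v => v ++ [q.2]))
          PySem.Dict.empty := by
    rw [List.foldl_map]
    exact PySem.List.foldl_congr_mem _ _ _ _ (fun acc x _ => stepA_eq_modify acc x)
  rw [hfold]
  set pairs := l.map (fun p : Int × Char => (String.ofList [p.2], p.1)) with hpairs
  set D := pairs.foldl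
      (fun (d : PySem.Dict String (List Int)) (q : String × Int) =>
        d.modify q.1 [] (fun v => v ++ [q.2]))
      PySem.Dict.empty with hD
  have hnodup : D.keys.Nodup := by
    rw [hD]
    exact PySem.Dict.nodup_keys_foldl_modify_key pairs (fun q => q.1)
      [] (fun d q v => v ++ [q.2]) PySem.Dict.empty (by simp)
  have hmapfst : pairs.map (fun q : String × Int => q.1) = s.map (fun c => String.ofList [c]) := by
    rw [hpairs, List.map_map]
    calc l.map ((fun q : String × Int => q.1) ∘ (fun p : Int × Char => (String.ofList [p.2], p.1)))
        = (l.map (fun p : Int × Char => p.2)).map (fun c => String.ofList [c]) := by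
          rw [List.map_map]; rfl
      _ = s.map (fun c => String.ofList [c]) := by rw [hl, PySem.List.map_snd_enumerate]
  have hkeys : D.keys = (PySem.List.dedup s).map (fun c => String.ofList [c]) := by
    rw [hD, PySem.Dict.keys_foldl_modify_key, hmapfst]
    simp only [PySem.Dict.keys_empty, PySem.Set.update]
    rw [← PySem.Set.ofList_eq_foldl, PySem.List.dedup_eq_ofList]
    exact ofList_map_inj _ (fun a b => mkStr_inj) s
  have hget : ∀ c : Char, D.getD (String.ofList [c]) [] =
      (l.filter (fun p : Int × Char => p.2 == c)).map (fun p => p.1) := by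
    intro c
    rw [hD, PySem.Dict.getD_foldl_modify_append, hpairs, List.filter_map, List.map_map]
    rw [List.filter_congr (fun p _ => by
      show ((fun q : String × Int => q.1 == String.ofList [c]) ∘
        (fun p : Int × Char => (String.ofList [p.2], p.1))) p = (p.2 == c)
      simp [Function.comp, mkStr_beq])]
    simp
  rw [PySem.Dict.items_eq_map_keys D hnodup [], hkeys, List.map_map]
  refine List.map_congr_left (fun c hc => ?_)
  show (String.ofList [c], D.getD (String.ofList [c]) []) = _
  rw [hget c]

-- ===== VERDICT (by name: the statement is the Claim_ definition above) =====
theorem find_character_indices_spec : Claim_equal_find_character_indices := by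
  intro text _
  exact find_character_indices_eq_alt text
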